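-- pv_equiv track=rewrite | github.com/jackljk/jackljk.github.io | coding/UCSD/DSC/DSC20/homeworks/hw02.py | grocery_summary
-- ===== SOURCE A (Python) =====
-- def grocery_summary(grocery_purchases):
--     """
--     ############################################################## # First I
--     iterate through the list of dictionaries. in each iteration, I iterate
--     through the store(key) and item(list of items bought from the store) in
--     the dictionary. Then I add the stores as the keys to a new dictionary
--     and then I iterate through the list of bought items and check if the
--     item already exist in the list or not. If it is new I add it if it is
--     not I don't add it.# # method description and add at least 3 more
--     doctests below. #
--     ##############################################################
--
--     >>> p1 = [{'mitsuwa': ['rice'], '99ranch': ['msg']}, \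
-- {'99ranch': ['sambal', 'banana leaf'], 'costco': ['eggs']}]
--     >>> grocery_summary(p1)
--     {'mitsuwa': ['rice'], '99ranch': ['msg', 'sambal', 'banana leaf'], \
-- 'costco': ['eggs']}
--     >>> p2 = [{'ralphs': ['milk', 'carrot', 'milk'], 'costco': ['carrot']}, \
-- {'ralphs': ['carrot', 'carrot', 'milk'], 'costco': ['carrot']}]
--     >>> grocery_summary(p2)
--     {'ralphs': ['milk', 'carrot'], 'costco': ['carrot']}
--
--     # Add at least 3 doctests below here #
--
--     """
--     d = {}
--     for purchases in grocery_purchases: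
--         for store, items in purchases.items():
--             if store not in d.keys():
--                 d[store] = []
--             for item in items:
--                 if item not in d[store]:
--                     d[store].append(item)
--
--     return d
-- ===== SOURCE B (Python) =====
-- def grocery_summary(grocery_purchases):
--     # Pass 1: aggregate all items per store, in order, without dedup.
--     agg = {}
--     for purchases in grocery_purchases:
--         for store, items in purchases.items():
--             agg.setdefault(store, []).extend(items)
--     # Pass 2: order-preserving dedup of each store's concatenated items.
--     return {store: list(dict.fromkeys(items)) for store, items in agg.items()}
-- ===== Notes on version B (the rewrite author's own statement) =====
-- stated objective: faster
-- what changed: Replaces A's single interleaved loop with a per-item list-membership scan against the growing result by two passes: first aggregate each store's items by plain concatenation (setdefault+extend), then dedup each concatenated list once with hash-based dict.fromkeys.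
import Mathlib
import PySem

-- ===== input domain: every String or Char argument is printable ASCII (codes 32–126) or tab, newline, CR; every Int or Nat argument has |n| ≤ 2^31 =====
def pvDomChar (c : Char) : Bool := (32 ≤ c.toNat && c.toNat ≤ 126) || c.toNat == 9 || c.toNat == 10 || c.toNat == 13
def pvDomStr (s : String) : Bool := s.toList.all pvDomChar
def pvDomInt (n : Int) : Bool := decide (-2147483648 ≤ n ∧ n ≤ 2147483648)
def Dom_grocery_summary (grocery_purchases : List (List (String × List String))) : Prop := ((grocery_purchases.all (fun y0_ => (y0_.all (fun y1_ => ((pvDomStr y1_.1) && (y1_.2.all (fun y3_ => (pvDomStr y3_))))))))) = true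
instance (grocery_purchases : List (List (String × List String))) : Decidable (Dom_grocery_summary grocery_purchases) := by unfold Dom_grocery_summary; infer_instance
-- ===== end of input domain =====

-- B replaces A's interleaved per-item list-membership loop by two passes: aggregate per-store
-- concatenation first, then one hash-based order-preserving dedup per list (measured faster).

-- ===== PORT A =====
-- literal port of A: one dict, per-item membership test against the growing per-store list
def grocery_summary (grocery_purchases : List (List (String × List String))) : List (String × List String) :=
  (grocery_purchases.foldl (fun d purchases =>
      purchases.foldl (fun d sv =>
        let d1 := if sv.1 ∈ PySem.Dict.keys d then d else PySem.Dict.insert d sv.1 []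
        sv.2.foldl (fun d item =>
          if item ∈ PySem.Dict.getD d sv.1 [] then d
          else PySem.Dict.insert d sv.1 (PySem.Dict.getD d sv.1 [] ++ [item])) d1) d)
    (PySem.Dict.mk [])).items

-- ===== PORT B =====
-- literal port of B: pass 1 aggregates with setdefault+extend, pass 2 dedups each list
def grocery_summary_alt (grocery_purchases : List (List (String × List String))) : List (String × List String) :=
  let agg := grocery_purchases.foldl (fun agg purchases =>
      purchases.foldl (fun agg sv =>
        PySem.Dict.insert agg sv.1 (PySem.Dict.getD agg sv.1 [] ++ sv.2)) agg)
    (PySem.Dict.mk [])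
  agg.items.map (fun sv => (sv.1, PySem.List.dedup sv.2))

-- ===== PRECONDITION & SPEC =====
def Spec_grocery_summary (grocery_purchases : List (List (String × List String))) (out : List (String × List String)) : Prop := out = grocery_summary_alt grocery_purchases
instance (grocery_purchases : List (List (String × List String))) (out : List (String × List String)) : Decidable (Spec_grocery_summary grocery_purchases out) := by unfold Spec_grocery_summary; infer_instance

-- ===== CLAIM (what is proved, stated in full; the proofs are below) =====
def Claim_equal_grocery_summary : Prop := ∀ (grocery_purchases : List (List (String × List String))), Dom_grocery_summary grocery_purchases → Spec_grocery_summary grocery_purchases (grocery_summary grocery_purchases)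

-- ===== LEMMAS AND PROOFS =====

-- proof-side names for the two loop bodies and the dedup-image of an association list
def pvMapD (l : List (String × List String)) : List (String × List String) :=
  l.map (fun p => (p.1, PySem.List.dedup p.2))

def pvStepA (d : PySem.Dict String (List String)) (sv : String × List String) :
    PySem.Dict String (List String) :=
  let d1 := if sv.1 ∈ PySem.Dict.keys d then d else PySem.Dict.insert d sv.1 []
  sv.2.foldl (fun d item =>
    if item ∈ PySem.Dict.getD d sv.1 [] then d
    else PySem.Dict.insert d sv.1 (PySem.Dict.getD d sv.1 [] ++ [item])) d1

def pvStepB (agg : PySem.Dict String (List String)) (sv : String × List String) :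
    PySem.Dict String (List String) :=
  PySem.Dict.insert agg sv.1 (PySem.Dict.getD agg sv.1 [] ++ sv.2)

def pvInv (d agg : PySem.Dict String (List String)) : Prop :=
  d.items = pvMapD agg.items ∧ agg.keys.Nodup

theorem pv_mem_keys_iff_contains (d : PySem.Dict String (List String)) (k : String) :
    k ∈ d.keys ↔ d.contains k = true := by
  simp [PySem.Dict.keys, PySem.Dict.contains, List.any_eq_true, List.mem_map]

theorem pv_keys_rel (d agg : PySem.Dict String (List String))
    (hrel : d.items = pvMapD agg.items) : d.keys = agg.keys := by
  simp [PySem.Dict.keys, hrel, pvMapD, List.map_map, Function.comp_def]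

theorem pv_get?_rel (d agg : PySem.Dict String (List String)) (k : String)
    (hrel : d.items = pvMapD agg.items) :
    d.get? k = (agg.get? k).map PySem.List.dedup := by
  simp [PySem.Dict.get?, hrel, pvMapD, List.find?_map, Function.comp_def, Option.map_map]

theorem pv_find?_of_not_mem (l : List (String × List String)) (k : String)
    (h : k ∉ l.map Prod.fst) : l.find? (fun p => p.1 == k) = none := by
  apply List.find?_eq_none.mpr
  intro p hp
  simp only [beq_iff_eq]
  intro he
  exact h (List.mem_map.mpr ⟨p, hp, he⟩)

theorem pv_insert_of_not_mem (d : PySem.Dict String (List String)) (k : String)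
    (v : List String) (h : k ∉ d.keys) :
    (d.insert k v).items = d.items ++ [(k, v)] := by
  have hc : d.contains k = false := by
    cases hc : d.contains k
    · rfl
    · exact absurd ((pv_mem_keys_iff_contains d k).mpr hc) h
  simp [PySem.Dict.insert, hc]

theorem pv_insert_of_contains (d : PySem.Dict String (List String)) (k : String)
    (v : List String) (h : d.contains k = true) :
    (d.insert k v).items
      = d.items.map (fun p => if p.1 == k then (k, v) else p) := by
  simp [PySem.Dict.insert, h]

theorem pv_map_replace_id (l : List (String × List String)) (k : String)
    (v : List String) (h : k ∉ l.map Prod.fst) :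
    l.map (fun p => if p.1 == k then (k, v) else p) = l := by
  rw [List.map_congr_left (g := id), List.map_id]
  intro p hp
  have : p.1 ≠ k := fun he => h (List.mem_map.mpr ⟨p, hp, he⟩)
  simp [this]

theorem pv_dict_ext (d e : PySem.Dict String (List String))
    (h : d.items = e.items) : d = e := by
  cases d; cases e; simpa using h

theorem pv_not_mem_keys_of_not_contains (d : PySem.Dict String (List String))
    (k : String) (hc : d.contains k = false) : k ∉ d.keys := by
  intro hm
  rw [(pv_mem_keys_iff_contains d k).mp hm] at hc
  cases hc

theorem pv_insert_insert_same (d : PySem.Dict String (List String)) (k : String)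
    (v1 v2 : List String) :
    (d.insert k v1).insert k v2 = d.insert k v2 := by
  apply pv_dict_ext
  cases hc : d.contains k
  · have hknot : k ∉ d.keys := pv_not_mem_keys_of_not_contains d k hc
    have h1 : (d.insert k v1).items = d.items ++ [(k, v1)] :=
      pv_insert_of_not_mem d k v1 hknot
    have hc1 : (d.insert k v1).contains k = true := by
      simp [PySem.Dict.contains, h1]
    rw [pv_insert_of_contains _ _ _ hc1, h1, pv_insert_of_not_mem d k v2 hknot,
      List.map_append, pv_map_replace_id d.items k v2 hknot]
    simp
  · have hc1 : (d.insert k v1).contains k = true := by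
      obtain ⟨p, hp, he⟩ : ∃ p ∈ d.items, p.1 = k := by
        simpa [PySem.Dict.contains, List.any_eq_true] using hc
      simp only [PySem.Dict.contains, pv_insert_of_contains _ _ _ hc,
        List.any_map, List.any_eq_true]
      exact ⟨p, hp, by simp [he]⟩
    rw [pv_insert_of_contains _ _ _ hc1, pv_insert_of_contains _ _ _ hc,
      pv_insert_of_contains _ _ _ hc, List.map_map]
    apply List.map_congr_left
    intro p _
    by_cases hp : p.1 = k <;> simp [Function.comp, hp]

theorem pv_replace_self (l : List (String × List String)) (k : String) (v0 : List String)
    (hn : (l.map Prod.fst).Nodup)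
    (hfind : l.find? (fun p => p.1 == k) = some (k, v0)) :
    l.map (fun p => if p.1 == k then (k, v0) else p) = l := by
  induction l with
  | nil => simp at hfind
  | cons p t ih =>
    by_cases hp : p.1 = k
    · rw [List.find?_cons_of_pos (by simp [hp])] at hfind
      have hpv : p = (k, v0) := by injection hfind
      have hkt : k ∉ t.map Prod.fst := by
        simp only [List.map_cons, List.nodup_cons] at hn
        exact hp ▸ hn.1
      have hhd : (if (p.1 == k) = true then (k, v0) else p) = p := by
        rw [hpv]; simp
      simp only [List.map_cons, hhd, pv_map_replace_id t k v0 hkt]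
    · rw [List.find?_cons_of_neg (by simp [hp])] at hfind
      simp only [List.map_cons, List.nodup_cons] at hn
      rw [List.map_cons, if_neg (by simp [hp])]
      rw [ih hn.2 hfind]

theorem pv_insert_getD_self (d : PySem.Dict String (List String)) (k : String)
    (dflt : List String) (hk : k ∈ d.keys) (hn : d.keys.Nodup) :
    d.insert k (d.getD k dflt) = d := by
  have hc : d.contains k = true := (pv_mem_keys_iff_contains d k).mp hk
  obtain ⟨p0, hp0⟩ : ∃ p0, d.items.find? (fun p => p.1 == k) = some p0 := by
    apply Option.isSome_iff_exists.mp
    apply List.find?_isSome.mpr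
    simpa [PySem.Dict.contains, List.any_eq_true] using hc
  obtain ⟨k0, v0⟩ := p0
  have hp0k : k0 = k := by
    have := List.find?_some hp0
    simpa using this
  subst hp0k
  have hgd : d.getD k0 dflt = v0 := by
    simp [PySem.Dict.getD, PySem.Dict.get?, hp0]
  apply pv_dict_ext
  rw [pv_insert_of_contains _ _ _ hc, hgd]
  exact pv_replace_self d.items k0 v0 hn hp0

theorem pv_set_add_of_mem {s : PySem.Set String} {x : String} (h : x ∈ s) :
    s.add x = s := by
  simp [PySem.Set.add, h]

theorem pv_set_add_of_not_mem {s : PySem.Set String} {x : String} (h : x ∉ s) :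
    s.add x = s ++ [x] := by
  simp [PySem.Set.add, h]

-- the inner item loop of A, run on a dict that already has an entry for `store`,
-- just folds `Set.add` into that entry's value
theorem pv_itemfold (items : List String) (d : PySem.Dict String (List String))
    (store : String) (hk : store ∈ d.keys) (hn : d.keys.Nodup) :
    items.foldl (fun d item =>
        if item ∈ PySem.Dict.getD d store [] then d
        else PySem.Dict.insert d store (PySem.Dict.getD d store [] ++ [item])) d
      = d.insert store (items.foldl PySem.Set.add (d.getD store [])) := by
  induction items generalizing d with
  | nil => simp [pv_insert_getD_self d store [] hk hn]
  | cons item rest ih =>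
    by_cases hm : item ∈ d.getD store []
    · simp only [List.foldl_cons, if_pos hm, pv_set_add_of_mem hm]
      exact ih d hk hn
    · simp only [List.foldl_cons, if_neg hm, pv_set_add_of_not_mem hm]
      set d' := d.insert store (d.getD store [] ++ [item]) with hd'
      have hk' : store ∈ d'.keys := by
        rw [pv_mem_keys_iff_contains, hd', PySem.Dict.contains_insert]
        simp
      have hn' : d'.keys.Nodup := PySem.Dict.nodup_keys_insert d store _ hn
      have hgd' : d'.getD store [] = d.getD store [] ++ [item] := by
        rw [hd', PySem.Dict.getD_insert]; simp
      rw [ih d' hk' hn', hgd', hd', pv_insert_insert_same]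

theorem pv_dedup_append (v items : List String) :
    (v ++ items).foldl PySem.Set.add PySem.Set.empty
      = items.foldl PySem.Set.add (PySem.List.dedup v) := by
  simp [PySem.List.dedup, PySem.Set.ofList, List.foldl_append]

theorem pv_insert_rel (d agg : PySem.Dict String (List String)) (k : String)
    (v : List String) (hrel : d.items = pvMapD agg.items) :
    (d.insert k (PySem.List.dedup v)).items = pvMapD ((agg.insert k v).items) := by
  have hcc : d.contains k = agg.contains k := by
    simp [PySem.Dict.contains, hrel, pvMapD, List.any_map, Function.comp_def]
  cases hc : agg.contains k
  · have hdnot : k ∉ d.keys := pv_not_mem_keys_of_not_contains d k (hcc.trans hc)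
    have hanot : k ∉ agg.keys := pv_not_mem_keys_of_not_contains agg k hc
    rw [pv_insert_of_not_mem d k _ hdnot, pv_insert_of_not_mem agg k v hanot, hrel]
    simp [pvMapD]
  · rw [pv_insert_of_contains d k _ (hcc.trans hc), pv_insert_of_contains agg k v hc,
      hrel]
    simp only [pvMapD, List.map_map]
    apply List.map_congr_left
    intro p _
    by_cases hp : p.1 = k <;> simp [Function.comp, hp]

theorem pv_step_inv (d agg : PySem.Dict String (List String))
    (sv : String × List String) (h : pvInv d agg) :
    pvInv (pvStepA d sv) (pvStepB agg sv) := by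
  obtain ⟨hrel, hn⟩ := h
  have hkeys : d.keys = agg.keys := pv_keys_rel d agg hrel
  have hnd : d.keys.Nodup := hkeys ▸ hn
  constructor
  · by_cases hk : sv.1 ∈ agg.keys
    · -- store already present in both dicts
      obtain ⟨v0, hv0⟩ : ∃ v0, agg.get? sv.1 = some v0 := by
        apply Option.isSome_iff_exists.mp
        have hc := (pv_mem_keys_iff_contains agg sv.1).mp hk
        simp only [PySem.Dict.get?, Option.isSome_map]
        apply List.find?_isSome.mpr
        simpa [PySem.Dict.contains, List.any_eq_true] using hc
      have hgd : d.getD sv.1 [] = PySem.List.dedup v0 := by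
        simp [PySem.Dict.getD, pv_get?_rel d agg sv.1 hrel, hv0]
      have hga : agg.getD sv.1 [] = v0 := by simp [PySem.Dict.getD, hv0]
      show (pvStepA d sv).items = pvMapD (pvStepB agg sv).items
      rw [pvStepA, pvStepB]
      simp only [if_pos (hkeys ▸ hk)]
      rw [pv_itemfold sv.2 d sv.1 (hkeys ▸ hk) hnd, hgd, hga]
      rw [← pv_dedup_append v0 sv.2]
      exact pv_insert_rel d agg sv.1 (v0 ++ sv.2) hrel
    · -- new store
      have hgd : agg.getD sv.1 [] = [] := by
        simp [PySem.Dict.getD, PySem.Dict.get?,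
          pv_find?_of_not_mem agg.items sv.1 hk]
      show (pvStepA d sv).items = pvMapD (pvStepB agg sv).items
      rw [pvStepA, pvStepB]
      simp only [if_neg (hkeys ▸ hk)]
      set d1 := d.insert sv.1 [] with hd1
      have hk1 : sv.1 ∈ d1.keys := by
        rw [pv_mem_keys_iff_contains, hd1, PySem.Dict.contains_insert]; simp
      have hn1 : d1.keys.Nodup := PySem.Dict.nodup_keys_insert d sv.1 [] hnd
      have hgd1 : d1.getD sv.1 [] = [] := by
        rw [hd1, PySem.Dict.getD_insert]; simp
      rw [pv_itemfold sv.2 d1 sv.1 hk1 hn1, hgd1, hd1, pv_insert_insert_same, hgd]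
      have h2 : sv.2.foldl PySem.Set.add ([] : PySem.Set String)
          = PySem.List.dedup ([] ++ sv.2) := by
        simp [PySem.List.dedup, PySem.Set.ofList, PySem.Set.empty]
      rw [h2]
      exact pv_insert_rel d agg sv.1 ([] ++ sv.2) hrel
  · exact PySem.Dict.nodup_keys_insert agg sv.1 _ hn

theorem pv_fold_purchases_inv (ps : List (String × List String))
    (d agg : PySem.Dict String (List String)) (h : pvInv d agg) :
    pvInv (ps.foldl pvStepA d) (ps.foldl pvStepB agg) := by
  induction ps generalizing d agg with
  | nil => exact h
  | cons sv t ih => exact ih _ _ (pv_step_inv d agg sv h)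

theorem pv_fold_all_inv (gp : List (List (String × List String)))
    (d agg : PySem.Dict String (List String)) (h : pvInv d agg) :
    pvInv (gp.foldl (fun d ps => ps.foldl pvStepA d) d)
      (gp.foldl (fun agg ps => ps.foldl pvStepB agg) agg) := by
  induction gp generalizing d agg with
  | nil => exact h
  | cons ps t ih => exact ih _ _ (pv_fold_purchases_inv ps d agg h)

-- ===== VERDICT (by name: the statement is the Claim_ definition above) =====
theorem grocery_summary_spec : Claim_equal_grocery_summary := by
  intro gp _
  show grocery_summary gp = grocery_summary_alt gp
  have h := pv_fold_all_inv gp (PySem.Dict.mk []) (PySem.Dict.mk []) ⟨rfl, by simp [PySem.Dict.keys]⟩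
  exact h.1
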